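-- pv_equiv track=rewrite | github.com/0LL13/advent | 20/day_2.py | new_rule_check
-- ===== SOURCE A (Python) =====
-- def new_rule_check(low: int, hi: int, letter: str, psw: str) -> bool:
--     count = 0
--     for i, ch in enumerate(psw):
--         if ch == letter and i in [hi, low]:
--             count += 1
--
--     if count == 1:
--         return True
--     return False
-- ===== SOURCE B (Python) =====
-- def new_rule_check(low: int, hi: int, letter: str, psw: str) -> bool:
--     def hit(p):
--         return 0 <= p < len(psw) and psw[p] == letter
--     if low == hi:
--         return hit(low)
--     return hit(low) != hit(hi)
-- ===== Notes on version B (the rewrite author's own statement) =====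
-- stated objective: faster
-- what changed: B replaces A's scan over all of psw with two O(1) direct index probes (XOR of the two hits, or a single probe when low == hi), never iterating over the string.
import Mathlib
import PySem

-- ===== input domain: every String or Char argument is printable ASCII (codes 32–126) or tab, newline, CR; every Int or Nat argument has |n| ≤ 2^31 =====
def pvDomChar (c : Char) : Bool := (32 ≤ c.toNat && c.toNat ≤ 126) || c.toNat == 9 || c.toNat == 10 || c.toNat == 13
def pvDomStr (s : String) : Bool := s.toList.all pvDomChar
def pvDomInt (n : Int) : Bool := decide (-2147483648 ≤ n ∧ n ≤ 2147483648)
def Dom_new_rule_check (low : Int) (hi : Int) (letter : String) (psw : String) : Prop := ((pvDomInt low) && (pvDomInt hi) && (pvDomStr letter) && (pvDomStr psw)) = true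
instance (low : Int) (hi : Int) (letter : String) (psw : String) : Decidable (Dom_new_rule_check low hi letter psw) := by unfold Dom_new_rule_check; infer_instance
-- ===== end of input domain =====

-- B replaces A's full scan of psw with at most two O(1) index probes; same return value on every input.

-- ===== PORT A =====
-- the loop 'for i, ch in enumerate(psw): if ch == letter and i in [hi, low]: count += 1'
def nrcLoopA (hi low : Int) (letter : String) (l : List (Int × Char)) (count : Int) : Int :=
  match l with
  | [] => count
  | p :: rest =>
      nrcLoopA hi low letter rest
        (if letter.toList = [p.2] ∧ (p.1 = hi ∨ p.1 = low) then count + 1 else count)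

def new_rule_check (low : Int) (hi : Int) (letter : String) (psw : String) : Bool :=
  let count := nrcLoopA hi low letter (PySem.List.enumerate psw.toList 0) 0
  if count = 1 then true else false

-- ===== PORT B =====
-- hit(p) of Source B: '0 <= p < len(psw) and psw[p] == letter' (the index is guarded, so psw[p] is safe)
def nrcHit (letter : String) (psw : String) (p : Int) : Bool :=
  decide (0 ≤ p) && decide (p < PySem.Str.len psw) &&
    (match PySem.Str.pyGet? psw p with
     | some c => decide (letter.toList = [c])
     | none => false)

def new_rule_check_alt (low : Int) (hi : Int) (letter : String) (psw : String) : Bool :=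
  if low = hi then nrcHit letter psw low
  else nrcHit letter psw low != nrcHit letter psw hi

-- ===== PRECONDITION & SPEC =====
def Spec_new_rule_check (low : Int) (hi : Int) (letter : String) (psw : String) (out : Bool) : Prop := out = new_rule_check_alt low hi letter psw
instance (low : Int) (hi : Int) (letter : String) (psw : String) (out : Bool) : Decidable (Spec_new_rule_check low hi letter psw out) := by unfold Spec_new_rule_check; infer_instance

-- ===== CLAIM (what is proved, stated in full; the proofs are below) =====
def Claim_equal_new_rule_check : Prop := ∀ (low : Int) (hi : Int) (letter : String) (psw : String), Dom_new_rule_check low hi letter psw → Spec_new_rule_check low hi letter psw (new_rule_check low hi letter psw)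

-- ===== LEMMAS AND PROOFS =====

-- proof-side form of nrcHit, stated on the character list
def charsHit (letter : String) (l : List Char) (p : Int) : Bool :=
  decide (0 ≤ p) && decide (p < (l.length : Int)) &&
    (match l[p.toNat]? with
     | some c => decide (letter.toList = [c])
     | none => false)

theorem nrcHit_eq (letter psw : String) (p : Int) :
    nrcHit letter psw p = charsHit letter psw.toList p := by
  simp [nrcHit, charsHit, PySem.Str.len_eq, PySem.Str.pyGet?, PySem.Chars.pyGet?]
  by_cases h0 : 0 ≤ p
  · rw [PySem.List.pyGet?_of_nonneg _ h0]
  · simp [h0]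

theorem charsHit_nil (letter : String) (p : Int) : charsHit letter [] p = false := by
  simp [charsHit]

theorem charsHit_neg (letter : String) (l : List Char) (p : Int) (h : p < 0) :
    charsHit letter l p = false := by
  have h0 : ¬ (0 ≤ p) := by omega
  simp [charsHit, h0]

theorem charsHit_cons (letter : String) (x : Char) (xs : List Char) (p : Int) :
    charsHit letter (x :: xs) p
      = if p = 0 then decide (letter.toList = [x]) else charsHit letter xs (p - 1) := by
  by_cases hp : p = 0
  · subst hp; simp [charsHit]
  · simp only [if_neg hp]
    by_cases h0 : 0 < p
    · have hpt : p.toNat = (p - 1).toNat + 1 := by omega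
      simp only [charsHit, hpt, List.getElem?_cons_succ]
      have h1 : decide (0 ≤ p) = true := by rw [decide_eq_true_iff]; omega
      have h2 : decide (0 ≤ p - 1) = true := by rw [decide_eq_true_iff]; omega
      have h3 : decide (p < ((x :: xs).length : Int)) = decide (p - 1 < (xs.length : Int)) := by
        rw [decide_eq_decide]; simp only [List.length_cons]; push_cast; omega
      rw [h1, h2, h3]
    · rw [charsHit_neg letter _ p (by omega), charsHit_neg letter _ _ (by omega)]

theorem nrcLoopA_spec (hi low : Int) (letter : String) :
    ∀ (l : List Char) (s c : Int),
      nrcLoopA hi low letter (PySem.List.enumerate l s) c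
        = c + (if charsHit letter l (hi - s) then 1 else 0)
            + (if hi ≠ low ∧ charsHit letter l (low - s) then 1 else 0) := by
  intro l
  induction l with
  | nil => intro s c; simp [PySem.List.enumerate_nil, nrcLoopA, charsHit_nil]
  | cons x xs ih =>
      intro s c
      rw [PySem.List.enumerate_cons, charsHit_cons, charsHit_cons]
      simp only [nrcLoopA]
      rw [ih (s + 1)]
      have e1 : hi - (s + 1) = hi - s - 1 := by ring
      have e2 : low - (s + 1) = low - s - 1 := by ring
      rw [e1, e2]
      have ehi : (hi - s = 0) = (s = hi) := by simp; omega
      have elo : (low - s = 0) = (s = low) := by simp; omega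
      simp only [ehi, elo]
      rcases Bool.dichotomy (charsHit letter xs (hi - s - 1)) with hch | hch <;>
        rcases Bool.dichotomy (charsHit letter xs (low - s - 1)) with hcl | hcl <;>
          rw [hch, hcl] <;>
            by_cases hx : letter.toList = [x] <;>
              by_cases hne : hi = low <;>
                by_cases shi : s = hi <;>
                  by_cases slo : s = low <;>
                    simp [hx, hne, shi, slo] <;>
                      first
                        | omega
                        | (apply absurd hcl; rw [charsHit_neg letter xs (low - s - 1) (by omega)]; simp; done)
                        | (apply absurd hch; rw [charsHit_neg letter xs (hi - s - 1) (by omega)]; simp; done)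

-- ===== VERDICT (by name: the statement is the Claim_ definition above) =====
theorem new_rule_check_spec : Claim_equal_new_rule_check := by
  intro low hi letter psw _
  unfold Spec_new_rule_check new_rule_check new_rule_check_alt
  rw [nrcHit_eq, nrcHit_eq]
  have h := nrcLoopA_spec hi low letter psw.toList 0 0
  rw [show hi - 0 = hi from by ring, show low - 0 = low from by ring] at h
  simp only [h]
  rcases Bool.dichotomy (charsHit letter psw.toList hi) with hH | hH <;>
    rcases Bool.dichotomy (charsHit letter psw.toList low) with hL | hL <;>
      rw [hH, hL] <;>
        by_cases hne : hi = low <;>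
          first
            | (subst hne; simp_all)
            | (simp [hne, Ne.symm hne])
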